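-- pv_equiv track=rewrite | github.com/MShia/ImPACT-Normative | fit_models.py | compute_iverson_classification
-- ===== SOURCE A (Python) =====
-- def compute_iverson_classification(percentiles):
--     """
--     Apply Iverson collective classification rules based on percentiles
--
--     Args:
--         percentiles: list of 4 percentile values (0-100)
--
--     Returns:
--         classification: string describing the overall cognitive status
--     """
--     # Count scores below various thresholds
--     below_25th = sum(p <= 25 for p in percentiles)
--     below_16th = sum(p <= 16 for p in percentiles)
--     below_10th = sum(p <= 10 for p in percentiles)
--     below_5th = sum(p <= 5 for p in percentiles)
--     below_2nd = sum(p <= 2 for p in percentiles)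
--
--     # Apply Iverson rules (in order of severity - most severe first)
--     if below_5th >= 3 or below_2nd >= 2:
--         return "Extremely Low"
--     elif below_10th >= 3 or below_5th >= 2 or any(p <= 2 for p in percentiles):
--         return "Unusually Low"
--     elif below_16th >= 3 or below_10th >= 2 or any(p <= 5 for p in percentiles):
--         return "Well Below Average"
--     elif below_25th >= 3 or below_16th >= 2 or any(p <= 10 for p in percentiles):
--         return "Below Average"
--     else:
--         return "Broadly Normal"
-- ===== SOURCE B (Python) =====
-- def _bisect_right(sp, x):
--     """Index past the last element <= x in sorted list sp (textbook bisect_right)."""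
--     lo, hi = 0, len(sp)
--     while lo < hi:
--         mid = (lo + hi) // 2
--         if x < sp[mid]:
--             hi = mid
--         else:
--             lo = mid + 1
--     return lo
--
--
-- def compute_iverson_classification(percentiles):
--     # Sort once, then read every threshold count off the sorted list by binary search.
--     sp = sorted(percentiles)
--     below_25th = _bisect_right(sp, 25)
--     below_16th = _bisect_right(sp, 16)
--     below_10th = _bisect_right(sp, 10)
--     below_5th = _bisect_right(sp, 5)
--     below_2nd = _bisect_right(sp, 2)
--
--     if below_5th >= 3 or below_2nd >= 2:
--         return "Extremely Low"
--     elif below_10th >= 3 or below_5th >= 2 or below_2nd >= 1: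
--         return "Unusually Low"
--     elif below_16th >= 3 or below_10th >= 2 or below_5th >= 1:
--         return "Well Below Average"
--     elif below_25th >= 3 or below_16th >= 2 or below_10th >= 1:
--         return "Below Average"
--     else:
--         return "Broadly Normal"
-- ===== Notes on version B (the rewrite author's own statement) =====
-- stated objective: alternative
-- what changed: Replaces A's five independent linear 0/1-sum scans and three any() scans with one sort of the percentiles followed by five hand-written bisect_right binary searches on the sorted list; the severity cascade reads the counts instead of rescanning.
import Mathlib
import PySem

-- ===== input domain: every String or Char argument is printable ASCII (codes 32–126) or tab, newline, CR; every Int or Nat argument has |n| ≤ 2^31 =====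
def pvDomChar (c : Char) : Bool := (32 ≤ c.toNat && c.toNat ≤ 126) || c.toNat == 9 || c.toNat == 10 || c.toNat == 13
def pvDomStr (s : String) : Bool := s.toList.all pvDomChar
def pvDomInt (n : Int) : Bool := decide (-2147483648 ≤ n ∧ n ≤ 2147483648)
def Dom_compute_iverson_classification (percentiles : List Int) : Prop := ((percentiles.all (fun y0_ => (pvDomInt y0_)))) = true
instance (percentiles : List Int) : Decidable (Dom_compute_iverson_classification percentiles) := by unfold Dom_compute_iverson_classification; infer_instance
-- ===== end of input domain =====

-- B replaces A's five linear 0/1-sum scans and three any() scans by one sort plus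
-- binary searches (bisect_right) on the sorted list; same severity cascade and strings.

-- ===== PORT A =====
def compute_iverson_classification (percentiles : List Int) : String :=
  let below_25th : Int := (percentiles.map (fun p => if p ≤ 25 then (1 : Int) else 0)).sum
  let below_16th : Int := (percentiles.map (fun p => if p ≤ 16 then (1 : Int) else 0)).sum
  let below_10th : Int := (percentiles.map (fun p => if p ≤ 10 then (1 : Int) else 0)).sum
  let below_5th : Int := (percentiles.map (fun p => if p ≤ 5 then (1 : Int) else 0)).sum
  let below_2nd : Int := (percentiles.map (fun p => if p ≤ 2 then (1 : Int) else 0)).sum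
  if below_5th ≥ 3 ∨ below_2nd ≥ 2 then "Extremely Low"
  else if below_10th ≥ 3 ∨ below_5th ≥ 2 ∨ percentiles.any (fun p => decide (p ≤ 2)) = true then "Unusually Low"
  else if below_16th ≥ 3 ∨ below_10th ≥ 2 ∨ percentiles.any (fun p => decide (p ≤ 5)) = true then "Well Below Average"
  else if below_25th ≥ 3 ∨ below_16th ≥ 2 ∨ percentiles.any (fun p => decide (p ≤ 10)) = true then "Below Average"
  else "Broadly Normal"

-- ===== PORT B =====
-- Source B's hand-written _bisect_right is the textbook bisect_right loop, which is
-- exactly PySem.List.bisectRight (fuel = len, lo = 0, hi = len, mid = (lo+hi)//2).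
def compute_iverson_classification_alt (percentiles : List Int) : String :=
  let sp := PySem.List.sorted percentiles (fun x => x) false
  let below_25th : Nat := PySem.List.bisectRight sp 25
  let below_16th : Nat := PySem.List.bisectRight sp 16
  let below_10th : Nat := PySem.List.bisectRight sp 10
  let below_5th : Nat := PySem.List.bisectRight sp 5
  let below_2nd : Nat := PySem.List.bisectRight sp 2
  if below_5th ≥ 3 ∨ below_2nd ≥ 2 then "Extremely Low"
  else if below_10th ≥ 3 ∨ below_5th ≥ 2 ∨ below_2nd ≥ 1 then "Unusually Low"
  else if below_16th ≥ 3 ∨ below_10th ≥ 2 ∨ below_5th ≥ 1 then "Well Below Average"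
  else if below_25th ≥ 3 ∨ below_16th ≥ 2 ∨ below_10th ≥ 1 then "Below Average"
  else "Broadly Normal"

-- ===== PRECONDITION & SPEC =====
def Spec_compute_iverson_classification (percentiles : List Int) (out : String) : Prop := out = compute_iverson_classification_alt percentiles
instance (percentiles : List Int) (out : String) : Decidable (Spec_compute_iverson_classification percentiles out) := by unfold Spec_compute_iverson_classification; infer_instance

-- ===== CLAIM (what is proved, stated in full; the proofs are below) =====
def Claim_equal_compute_iverson_classification : Prop := ∀ (percentiles : List Int), Dom_compute_iverson_classification percentiles → Spec_compute_iverson_classification percentiles (compute_iverson_classification percentiles)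

-- ===== LEMMAS AND PROOFS =====

-- A sorted list whose first r entries are ≤ t and whose remaining entries are > t
-- has exactly r entries ≤ t.
theorem pv_countP_of_split (sp : List Int) (t : Int) (r : Nat) (hr : r ≤ sp.length)
    (h1 : ∀ (j : Nat) (hj : j < sp.length), j < r → sp[j] ≤ t)
    (h2 : ∀ (j : Nat) (hj : j < sp.length), r ≤ j → t < sp[j]) :
    sp.countP (fun p => decide (p ≤ t)) = r := by
  have hsplit : sp = sp.take r ++ sp.drop r := (List.take_append_drop r sp).symm
  have htake : (sp.take r).countP (fun p => decide (p ≤ t)) = r := by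
    have hall : ∀ a ∈ sp.take r, (fun p => decide (p ≤ t)) a = true := by
      intro a ha
      obtain ⟨i, hi, hget⟩ := List.mem_iff_getElem.mp ha
      have hi' : i < sp.length := lt_of_lt_of_le (lt_of_lt_of_le hi (by simp)) le_rfl
      have : (sp.take r)[i] = sp[i] := List.getElem_take
      have hir : i < r := lt_of_lt_of_le hi (by simp)
      subst hget
      simpa [this] using h1 i hi' hir
    rw [List.countP_eq_length.mpr hall, List.length_take]
    omega
  have hdrop : (sp.drop r).countP (fun p => decide (p ≤ t)) = 0 := by
    apply List.countP_eq_zero.mpr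
    intro a ha
    obtain ⟨i, hi, hget⟩ := List.mem_iff_getElem.mp ha
    have hilt : i < sp.length - r := by simpa [List.length_drop] using hi
    have hi' : r + i < sp.length := by omega
    have hgd : (sp.drop r)[i] = sp[r + i] := List.getElem_drop
    have ht := h2 (r + i) hi' (by omega)
    subst hget
    simp only [hgd, decide_eq_true_eq]
    omega
  calc sp.countP (fun p => decide (p ≤ t))
      = (sp.take r ++ sp.drop r).countP (fun p => decide (p ≤ t)) := by rw [← hsplit]
    _ = r := by rw [List.countP_append, htake, hdrop]; omega

-- bisect_right on the sorted list computes the number of percentiles ≤ t.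
theorem pv_bisect_count (ps : List Int) (t : Int) :
    PySem.List.bisectRight (PySem.List.sorted ps (fun x => x) false) t
      = ps.countP (fun p => decide (p ≤ t)) := by
  set sp := PySem.List.sorted ps (fun x => x) false with hsp
  have hpair : List.Pairwise (fun a b => a ≤ b) sp := by
    simpa using PySem.List.sorted_pairwise ps (fun x => x)
  obtain ⟨hr, h1, h2⟩ := PySem.List.bisectRight_spec sp t hpair
  have hperm : sp.Perm ps := PySem.List.sorted_perm ps (fun x => x) false
  rw [← hperm.countP_eq]
  exact (pv_countP_of_split sp t _ hr h1 h2).symm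

-- A's generator sum of 0/1 over a Prop test is the countP of the Bool test.
theorem pv_sum_count (ps : List Int) (t : Int) :
    (ps.map (fun p => if p ≤ t then (1 : Int) else 0)).sum
      = (ps.countP (fun p => decide (p ≤ t)) : Int) := by
  induction ps with
  | nil => simp
  | cons a l ih =>
      simp only [List.map_cons, List.sum_cons, List.countP_cons, ih]
      by_cases h : a ≤ t
      · rw [if_pos h, if_pos (by simp [h])]
        omega
      · rw [if_neg h, if_neg (by simp [h])]
        omega

theorem pv_cast3 (n : Nat) : ((n : Int) ≥ 3) ↔ n ≥ 3 := by exact_mod_cast Iff.rfl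
theorem pv_cast2 (n : Nat) : ((n : Int) ≥ 2) ↔ n ≥ 2 := by exact_mod_cast Iff.rfl

theorem pv_any_iff (ps : List Int) (t : Int) :
    (ps.any (fun p => decide (p ≤ t)) = true) ↔ ps.countP (fun p => decide (p ≤ t)) ≥ 1 := by
  rw [List.any_eq_true, ge_iff_le, Nat.one_le_iff_ne_zero, Ne, List.countP_eq_zero]
  simp

-- ===== VERDICT (by name: the statement is the Claim_ definition above) =====
theorem compute_iverson_classification_spec : Claim_equal_compute_iverson_classification := by
  intro ps _
  unfold Spec_compute_iverson_classification compute_iverson_classification compute_iverson_classification_alt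
  simp only [pv_bisect_count, pv_sum_count, pv_cast3, pv_cast2, pv_any_iff]
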